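-- pv_equiv track=rewrite | github.com/talonmyburgh/F-Engine_python_sim | pfb_floating.py | bit_rev
-- ===== SOURCE A (Python) =====
-- def bit_rev(a, bits):
--     a_copy = a
--     N = 1<<bits
--     for i in range(1,bits):
--         a >>=1
--         a_copy <<=1
--         a_copy |= (a&1)
--     a_copy &= N-1
--     return a_copy
-- ===== SOURCE B (Python) =====
-- def bit_rev(a, bits):
--     # Reverse the low `bits` bits of a via its binary-string representation:
--     # mask first, format zero-padded MSB-first, then place digit i at position i.
--     m = a & ((1 << bits) - 1)
--     return sum((ch == '1') << i for i, ch in enumerate(format(m, '0%db' % bits)))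
-- ===== Notes on version B (the rewrite author's own statement) =====
-- stated objective: alternative
-- what changed: Replaces A's shift-accumulate loop over an (a, a_copy) state with a string-representation pipeline: mask the low bits, format them as a zero-padded binary string, and sum each digit shifted to its mirrored position.
-- outside the precondition, e.g. on bit_rev(5, -1): A raises ValueError, B raises ValueError
import Mathlib
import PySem

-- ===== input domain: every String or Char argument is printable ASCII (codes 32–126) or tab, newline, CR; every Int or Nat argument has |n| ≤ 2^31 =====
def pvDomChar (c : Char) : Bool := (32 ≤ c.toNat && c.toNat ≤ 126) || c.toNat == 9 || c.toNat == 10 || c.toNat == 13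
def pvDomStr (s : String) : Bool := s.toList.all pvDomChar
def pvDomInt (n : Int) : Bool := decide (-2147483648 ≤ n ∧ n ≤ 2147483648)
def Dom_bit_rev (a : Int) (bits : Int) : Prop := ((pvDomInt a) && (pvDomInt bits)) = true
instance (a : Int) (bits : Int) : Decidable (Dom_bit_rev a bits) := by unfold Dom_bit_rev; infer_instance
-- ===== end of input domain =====

-- B re-implements bit reversal through the binary-string representation (mask, zero-padded
-- format, digit i goes to position i) instead of A's shift-accumulate loop; objective: alternative.


-- ===== PORT A =====
-- one loop iteration: a >>= 1; a_copy <<= 1; a_copy |= (a & 1)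
def bitrevStep (st : Int × Int) : Int × Int :=
  let a' := st.1 >>> (1 : Nat)
  (a', PySem.Int.bor (st.2 <<< (1 : Nat)) (PySem.Int.band a' 1))

def bit_rev (a : Int) (bits : Int) : Int :=
  -- N = 1 << bits; Pre_ demands 0 ≤ bits (Python raises ValueError on a negative shift count)
  let N : Int := (1 : Int) <<< bits.toNat
  let st := (PySem.List.pyRange 1 bits 1).foldl (fun st _ => bitrevStep st) (a, a)
  PySem.Int.band st.2 (N - 1)

-- ===== PORT B =====
-- minimal MSB-first binary digits of m ([] for 0)
def binCore (m : Nat) : List Char :=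
  if h : m = 0 then []
  else binCore (m / 2) ++ [if m % 2 = 1 then '1' else '0']
decreasing_by exact Nat.div_lt_self (Nat.pos_of_ne_zero h) (by omega)

-- hand port of format(m, '0%db' % w) for m ≥ 0 (exact there; B only formats the masked,
-- hence nonnegative, value): minimal binary digits, left-padded with '0' to width w
def fmtBin (w : Nat) (m : Nat) : List Char :=
  let s := if m = 0 then ['0'] else binCore m
  List.replicate (w - s.length) '0' ++ s

def bit_rev_alt (a : Int) (bits : Int) : Int :=
  let m := PySem.Int.band a (((1 : Int) <<< bits.toNat) - 1)
  -- sum((ch == '1') << i for i, ch in enumerate(...)), as the fold the generator performs: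
  -- the state is (next index i, running sum); i stays ≥ 0, so Python's shift by i is <<< i.toNat
  ((fmtBin bits.toNat m.toNat).foldl
    (fun (st : Int × Int) ch => (st.1 + 1, st.2 + ((if ch = '1' then (1 : Int) else 0) <<< st.1.toNat)))
    (0, 0)).2

-- ===== PRECONDITION & SPEC =====
-- Pre_ excludes bits < 0, where Python's `1 << bits` raises ValueError in both A and B.
def Pre_bit_rev (a : Int) (bits : Int) : Prop := 0 ≤ bits
instance (a : Int) (bits : Int) : Decidable (Pre_bit_rev a bits) := by unfold Pre_bit_rev; infer_instance
def pvWitness_bit_rev : Int × Int := (-7, 4)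

def Spec_bit_rev (a : Int) (bits : Int) (out : Int) : Prop := out = bit_rev_alt a bits
instance (a : Int) (bits : Int) (out : Int) : Decidable (Spec_bit_rev a bits out) := by unfold Spec_bit_rev; infer_instance

-- ===== CLAIM (what is proved, stated in full; the proofs are below) =====
def Claim_equal_bit_rev : Prop := ∀ (a : Int) (bits : Int), Dom_bit_rev a bits → Pre_bit_rev a bits → Spec_bit_rev a bits (bit_rev a bits)

-- ===== LEMMAS AND PROOFS =====

-- the common specification: S n x = the low n bits of x, reversed
def S : Nat → Int → Int
  | 0, _ => 0
  | n + 1, x => PySem.Int.mod x 2 * 2 ^ n + S n (PySem.Int.floordiv x 2)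

theorem S_eq (n : Nat) (x : Int) : S (n + 1) x = x % 2 * 2 ^ n + S n (x / 2) := by
  rw [S, PySem.Int.mod_eq_emod_of_pos (by omega), PySem.Int.floordiv_eq_ediv_of_pos (by omega)]

theorem S_nonneg (n : Nat) (x : Int) : 0 ≤ S n x := by
  induction n generalizing x with
  | zero => simp [S]
  | succ n ih =>
    rw [S_eq]
    have h1 : 0 ≤ x % 2 := Int.emod_nonneg x (by omega)
    have h2 := ih (x / 2)
    positivity

theorem S_lt (n : Nat) (x : Int) : S n x < 2 ^ n := by
  induction n generalizing x with
  | zero => simp [S]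
  | succ n ih =>
    rw [S_eq]
    have h1 : x % 2 < 2 := Int.emod_lt_of_pos x (by omega)
    have h2 := ih (x / 2)
    have h3 : x % 2 * 2 ^ n ≤ 2 ^ n := by nlinarith [pow_pos (by omega : (0:Int) < 2) n]
    calc x % 2 * 2 ^ n + S n (x / 2) < 2 ^ n + 2 ^ n := by omega
      _ = 2 ^ (n + 1) := by ring

theorem S_succ' (n : Nat) (x : Int) : S (n + 1) x = 2 * S n x + x / 2 ^ n % 2 := by
  induction n generalizing x with
  | zero => rw [S_eq]; norm_num [S]
  | succ n ih =>
    rw [S_eq, ih (x / 2), S_eq]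
    rw [Int.ediv_ediv_of_nonneg (by omega : (0:Int) ≤ 2)]
    have : (2 : Int) * 2 ^ n = 2 ^ (n + 1) := by ring
    rw [this]; ring

-- Python's  x & (2^n - 1)  is  x % 2^n  (also for negative x)
theorem band_mask (x : Int) (n : Nat) : PySem.Int.band x (2 ^ n - 1) = x % 2 ^ n := by
  have hpow : ((2 ^ n : Nat) : Int) = 2 ^ n := by push_cast; ring
  have hpos : (0 : Int) < 2 ^ n := by positivity
  unfold PySem.Int.band
  by_cases hx : 0 ≤ x
  · rw [if_pos hx, if_pos (by omega : (0:Int) ≤ 2 ^ n - 1)]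
    have ht : (2 ^ n - 1 : Int).toNat = 2 ^ n - 1 := by omega
    rw [ht, Nat.and_two_pow_sub_one_eq_mod]
    push_cast
    rw [Int.toNat_of_nonneg hx]
  · rw [if_neg hx, if_pos (by omega : (0:Int) ≤ 2 ^ n - 1)]
    set y : Nat := (-x - 1).toNat with hy
    have hxy : (y : Int) = -x - 1 := by omega
    have ht : (2 ^ n - 1 : Int).toNat = 2 ^ n - 1 := by omega
    rw [ht, Nat.and_comm, Nat.and_two_pow_sub_one_eq_mod]
    have hylt : y % 2 ^ n < 2 ^ n := Nat.mod_lt _ (by positivity)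
    -- x % 2^n = 2^n - 1 - (y % 2^n)
    have hq := Int.ediv_add_emod (y : Int) (2 ^ n)
    have hycast : ((y % 2 ^ n : Nat) : Int) = (y : Int) % 2 ^ n := by push_cast; ring
    have key : x + 2 ^ n * ((y : Int) / 2 ^ n + 1) = 2 ^ n - 1 - (y : Int) % 2 ^ n := by
      have : x = -(y : Int) - 1 := by omega
      rw [this]; linarith [hq]
    have h1 : x % 2 ^ n = (x + 2 ^ n * ((y : Int) / 2 ^ n + 1)) % 2 ^ n := by
      rw [Int.add_mul_emod_self_left]
    have h2 : (0 : Int) ≤ 2 ^ n - 1 - (y : Int) % 2 ^ n := by omega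
    have h3 : (2 : Int) ^ n - 1 - (y : Int) % 2 ^ n < 2 ^ n := by
      have := Int.emod_nonneg (y : Int) (by omega : (2:Int) ^ n ≠ 0)
      omega
    rw [h1, key, Int.emod_eq_of_lt h2 h3]
    omega

theorem bor_shift (c b : Int) (hb0 : 0 ≤ b) (hb2 : b < 2) :
    PySem.Int.bor (c <<< (1 : Nat)) b = 2 * c + b := by
  have hsh : c <<< (1 : Nat) = 2 * c := by rw [Int.shiftLeft_eq]; ring
  rw [hsh]
  unfold PySem.Int.bor
  interval_cases b
  · by_cases hc : 0 ≤ 2 * c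
    · rw [if_pos hc, if_pos (by omega : (0:Int) ≤ 0)]
      simp only [Int.toNat_zero, Nat.or_zero]; omega
    · rw [if_neg hc, if_pos (by omega : (0:Int) ≤ 0)]
      simp only [Int.toNat_zero, Nat.and_zero, Nat.sub_zero]; omega
  · by_cases hc : 0 ≤ 2 * c
    · rw [if_pos hc, if_pos (by omega : (0:Int) ≤ 1)]
      have h1 : (1 : Int).toNat = 1 := rfl
      rw [h1]
      have he : (2 * c).toNat = 2 * c.toNat := by omega
      rw [he]
      have horr := Nat.two_pow_add_eq_or_of_lt (i := 1) (b := 1) (by omega) c.toNat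
      norm_num at horr
      omega
    · rw [if_neg hc, if_pos (by omega : (0:Int) ≤ 1)]
      set y : Nat := (-(2 * c) - 1).toNat with hy
      have hyc : (y : Int) = -(2 * c) - 1 := by omega
      have hodd : y % 2 = 1 := by omega
      have h1 : (1 : Int).toNat = 1 := rfl
      rw [h1, Nat.and_one_is_mod, hodd]
      omega

-- one loop iteration, arithmetically
theorem step_eq (x c : Int) : bitrevStep (x, c) = (x / 2, 2 * c + x / 2 % 2) := by
  have hsh : x >>> (1 : Nat) = x / 2 := by
    have := Int.shiftRight_eq_div_pow x 1; simpa using this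
  have hband : PySem.Int.band (x / 2) 1 = x / 2 % 2 := by
    rw [PySem.Int.band_one, PySem.Int.mod_eq_emod_of_pos (by omega)]
  have h0 : 0 ≤ x / 2 % 2 := Int.emod_nonneg _ (by omega)
  have h2 : x / 2 % 2 < 2 := Int.emod_lt_of_pos _ (by omega)
  simp only [bitrevStep, hsh, hband]
  rw [bor_shift _ _ h0 h2]

theorem foldl_iterate {α β : Type} (f : α → α) (l : List β) (init : α) :
    l.foldl (fun st _ => f st) init = f^[l.length] init := by
  induction l generalizing init with
  | nil => rfl
  | cons x xs ih => simp [List.foldl_cons, ih, Function.iterate_succ_apply]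

theorem loop_invariant (a : Int) (n : Nat) :
    bitrevStep^[n] (a, a) = (a / 2 ^ n, a * 2 ^ n + S n (a / 2)) := by
  induction n with
  | zero => simp [S]
  | succ n ih =>
    rw [Function.iterate_succ_apply', ih, step_eq]
    have hdd : a / 2 ^ n / 2 = a / 2 ^ (n + 1) := by
      rw [Int.ediv_ediv_of_nonneg (by positivity : (0:Int) ≤ 2 ^ n)]; ring_nf
    have hdd2 : a / 2 / 2 ^ n = a / 2 ^ (n + 1) := by
      rw [Int.ediv_ediv_of_nonneg (by omega : (0:Int) ≤ 2)]
      congr 1; ring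
    simp only [Prod.mk.injEq]
    refine ⟨hdd, ?_⟩
    rw [S_succ' n (a / 2), hdd, hdd2]; ring

theorem range_len (n : Nat) (hn : 0 < n) : (PySem.List.pyRange 1 (n : Int) 1).length = n - 1 := by
  rw [PySem.List.pyRange_of_pos _ _ (by omega)]
  simp only [List.length_map, List.length_range]
  by_cases h : (1 : Int) < (n : Int)
  · rw [if_pos h]; omega
  · rw [if_neg h]; omega

-- A computes S on bits ≥ 1
theorem A_eq (a : Int) (k : Nat) : bit_rev a ((k : Int) + 1) = S (k + 1) a := by
  show PySem.Int.band _ _ = _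
  have hn : ((k : Int) + 1) = ((k + 1 : Nat) : Int) := by push_cast; ring
  have ht : ((k : Int) + 1).toNat = k + 1 := by omega
  have hc2 : ((2 ^ (k + 1) : Nat) : Int) = 2 ^ (k + 1) := by push_cast; ring
  rw [ht, Int.shiftLeft_eq', one_mul, hc2, hn, foldl_iterate, range_len (k + 1) (by omega)]

  have hlen : k + 1 - 1 = k := by omega
  rw [hlen, loop_invariant, band_mask]
  show (a * 2 ^ k + S k (a / 2)) % 2 ^ (k + 1) = S (k + 1) a
  -- (a * 2^k + S k (a/2)) % 2^(k+1) = a % 2 * 2^k + S k (a/2)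
  have hs0 := S_nonneg k (a / 2)
  have hs1 := S_lt k (a / 2)
  have hm0 : 0 ≤ a % 2 := Int.emod_nonneg a (by omega)
  have hm2 : a % 2 < 2 := Int.emod_lt_of_pos a (by omega)
  have hdecomp : a * 2 ^ k + S k (a / 2)
      = (a % 2 * 2 ^ k + S k (a / 2)) + 2 ^ (k + 1) * (a / 2) := by
    have := Int.ediv_add_emod a 2
    have h2 : a * 2 ^ k = (2 * (a / 2) + a % 2) * 2 ^ k := by rw [this]
    rw [h2]; ring
  rw [hdecomp, Int.add_mul_emod_self_left]
  have hlt : a % 2 * 2 ^ k + S k (a / 2) < 2 ^ (k + 1) := by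
    have hp : (0:Int) < 2 ^ k := by positivity
    have : a % 2 * 2 ^ k ≤ 2 ^ k := by nlinarith
    have hpk : (2:Int) ^ (k + 1) = 2 ^ k + 2 ^ k := by ring
    omega
  rw [Int.emod_eq_of_lt (by positivity) hlt, S_eq]

-- the nice snoc-style padded formatter
def binPad : Nat → Nat → List Char
  | 0, _ => []
  | n + 1, m => binPad n (m / 2) ++ [if m % 2 = 1 then '1' else '0']

theorem binPad_zero (n : Nat) : binPad n 0 = List.replicate n '0' := by
  induction n with
  | zero => rfl
  | succ n ih => rw [binPad, List.replicate_succ']; simp [ih]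

theorem padCore (n : Nat) : ∀ m : Nat, m < 2 ^ n →
    List.replicate (n - (binCore m).length) '0' ++ binCore m = binPad n m := by
  induction n with
  | zero =>
    intro m hm
    have : m = 0 := by omega
    subst this
    rw [binCore]; rfl
  | succ n ih =>
    intro m hm
    by_cases h0 : m = 0
    · subst h0
      rw [binCore]
      simp [binPad_zero]
    · rw [binCore, dif_neg h0]
      have hhalf : m / 2 < 2 ^ n := by
        have : (2:Nat) ^ (n + 1) = 2 ^ n * 2 := by ring
        omega
      have := ih (m / 2) hhalf
      rw [List.length_append]
      have harith : n + 1 - ((binCore (m / 2)).length + 1) = n - (binCore (m / 2)).length := by omega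
      simp only [List.length_singleton, harith, ← List.append_assoc, this, binPad]

theorem fmt_eq (n m : Nat) (hm : m < 2 ^ n) (hn : 0 < n) : fmtBin n m = binPad n m := by
  unfold fmtBin
  by_cases h0 : m = 0
  · subst h0
    simp only [binPad_zero]
    have : List.replicate n '0' = List.replicate (n - 1) '0' ++ ['0'] := by
      have hn1 : n = (n - 1) + 1 := by omega
      rw [hn1, List.replicate_succ']; simp
    rw [this]; simp
  · simp only [if_neg h0]
    exact padCore n m hm

-- value of B's indexed fold on a padded digit list
theorem foldl_binPad (n : Nat) : ∀ (m : Nat) (i acc : Int), 0 ≤ i →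
    (binPad n m).foldl
      (fun (st : Int × Int) ch => (st.1 + 1, st.2 + ((if ch = '1' then (1 : Int) else 0) <<< st.1.toNat)))
      (i, acc) = (i + n, acc + 2 ^ i.toNat * S n (m : Int)) := by
  induction n with
  | zero => intro m i acc hi; simp [binPad, S]
  | succ n ih =>
    intro m i acc hi
    rw [binPad, List.foldl_append, ih (m / 2) i acc hi]
    simp only [List.foldl_cons, List.foldl_nil]
    have hfst : (i + (n : Int)).toNat = i.toNat + n := by omega
    have hsh : ∀ (b : Int), b <<< ((i + (n : Int)).toNat) = b * 2 ^ (i.toNat + n) := by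
      intro b; rw [hfst, Int.shiftLeft_eq]
    have hS : S (n + 1) (m : Int) = ((m % 2 : Nat) : Int) * 2 ^ n + S n ((m / 2 : Nat) : Int) := by
      rw [S_eq]
      have h2 : ((m : Int)) % 2 = ((m % 2 : Nat) : Int) := by push_cast; ring
      have h3 : (m : Int) / 2 = ((m / 2 : Nat) : Int) := by push_cast; ring
      rw [h2, h3]
    have hd : (if (if m % 2 = 1 then '1' else '0') = '1' then (1 : Int) else 0)
        = ((m % 2 : Nat) : Int) := by
      by_cases hpar : m % 2 = 1
      · rw [if_pos hpar, if_pos rfl, hpar]; norm_num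
      · have hz : m % 2 = 0 := by omega
        rw [if_neg hpar, if_neg (by decide), hz]; norm_num
    rw [Prod.mk.injEq]
    constructor
    · push_cast; ring
    · rw [hsh, hd, hS, pow_add]; ring

-- S only depends on the low n bits
theorem S_mod (n : Nat) (x : Int) : S n (x % 2 ^ n) = S n x := by
  induction n generalizing x with
  | zero => rfl
  | succ n ih =>
    rw [S_eq, S_eq]
    have hdvd : (2 : Int) ∣ 2 ^ (n + 1) := ⟨2 ^ n, by ring⟩
    rw [Int.emod_emod_of_dvd x hdvd]
    have hhalf : x % 2 ^ (n + 1) / 2 = x / 2 % 2 ^ n := by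
      have hq := Int.ediv_add_emod x (2 ^ (n + 1))
      have hr0 : 0 ≤ x % 2 ^ (n + 1) := Int.emod_nonneg x (by positivity)
      have hr1 : x % 2 ^ (n + 1) < 2 ^ (n + 1) := Int.emod_lt_of_pos x (by positivity)
      set q := x / 2 ^ (n + 1)
      set r := x % 2 ^ (n + 1)
      have hx : x = r + 2 ^ n * q * 2 := by
        have h2 : (2:Int) ^ (n + 1) = 2 ^ n * 2 := by ring
        rw [← hq, h2]; ring
      have hx2 : x / 2 = r / 2 + 2 ^ n * q := by
        rw [hx, Int.add_mul_ediv_right _ _ (by omega : (2:Int) ≠ 0)]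
      rw [hx2, Int.add_mul_emod_self_left]
      have hrd0 : 0 ≤ r / 2 := Int.ediv_nonneg hr0 (by omega)
      have hrd1 : r / 2 < 2 ^ n := by
        have : (2:Int) ^ (n + 1) = 2 ^ n * 2 := by ring
        omega
      rw [Int.emod_eq_of_lt hrd0 hrd1]
    rw [hhalf, ih (x / 2)]

-- B computes S
theorem B_eq (a : Int) (n : Nat) (hn : 0 < n) : bit_rev_alt a (n : Int) = S n a := by
  simp only [bit_rev_alt]
  have hc2 : ((2 ^ n : Nat) : Int) = 2 ^ n := by push_cast; ring
  rw [Int.toNat_natCast, Int.shiftLeft_eq', one_mul, hc2, band_mask]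
  have h0 : 0 ≤ a % 2 ^ n := Int.emod_nonneg a (by positivity)
  have h1 : a % 2 ^ n < 2 ^ n := Int.emod_lt_of_pos a (by positivity)
  set M : Nat := (a % 2 ^ n).toNat with hM
  have hMc : (M : Int) = a % 2 ^ n := by omega
  have hpow : ((2 ^ n : Nat) : Int) = 2 ^ n := by push_cast; ring
  have hMlt : M < 2 ^ n := by omega
  rw [fmt_eq n M hMlt hn, foldl_binPad n M 0 0 (by omega)]
  simp only [pow_zero, one_mul, zero_add, Int.toNat_zero]
  rw [hMc]
  exact S_mod n a

-- ===== VERDICT (by name: the statement is the Claim_ definition above) =====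
theorem bit_rev_spec : Claim_equal_bit_rev := by
  intro a bits _ hpre
  unfold Spec_bit_rev Pre_bit_rev at *
  by_cases h0 : bits = 0
  · subst h0
    have hA : bit_rev a 0 = 0 := by
      unfold bit_rev
      have hpr : PySem.List.pyRange 1 0 1 = [] := by decide
      rw [hpr]
      norm_num
    have hB : bit_rev_alt a 0 = 0 := by
      unfold bit_rev_alt
      norm_num
      decide
    rw [hA, hB]
  · have hn : bits = ((bits.toNat : Nat) : Int) := by omega
    obtain ⟨k, hk⟩ : ∃ k, bits.toNat = k + 1 := ⟨bits.toNat - 1, by omega⟩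
    rw [hn, hk, B_eq a (k + 1) (by omega)]
    have hcast : ((k + 1 : Nat) : Int) = (k : Int) + 1 := by push_cast; ring
    rw [hcast, A_eq]
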